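-- pv_equiv track=rewrite | github.com/pjcodes007/COA | block.py | min_occur
-- ===== SOURCE A (Python) =====
-- def min_occur(main_mem,cache):
--     c=0
--     lis=list()
--     for i in range(0,len(cache)):
--         for j in main_mem:
--             if cache[i]==j:
--                 c=c+1
--         lis.insert(i,c)
--         c=0
--     return(lis)
-- ===== SOURCE B (Python) =====
-- def min_occur(main_mem, cache):
--     # Build a frequency table of main_mem once, then answer each cache query by lookup.
--     cnt = {}
--     for j in main_mem:
--         cnt[j] = cnt.get(j, 0) + 1
--     return [cnt.get(x, 0) for x in cache]
-- ===== Notes on version B (the rewrite author's own statement) =====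
-- stated objective: faster
-- what changed: Replaces the per-cache-element linear scan of main_mem with a single pass that builds a hash frequency table, answering each cache element by O(1) lookup.
import Mathlib
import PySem

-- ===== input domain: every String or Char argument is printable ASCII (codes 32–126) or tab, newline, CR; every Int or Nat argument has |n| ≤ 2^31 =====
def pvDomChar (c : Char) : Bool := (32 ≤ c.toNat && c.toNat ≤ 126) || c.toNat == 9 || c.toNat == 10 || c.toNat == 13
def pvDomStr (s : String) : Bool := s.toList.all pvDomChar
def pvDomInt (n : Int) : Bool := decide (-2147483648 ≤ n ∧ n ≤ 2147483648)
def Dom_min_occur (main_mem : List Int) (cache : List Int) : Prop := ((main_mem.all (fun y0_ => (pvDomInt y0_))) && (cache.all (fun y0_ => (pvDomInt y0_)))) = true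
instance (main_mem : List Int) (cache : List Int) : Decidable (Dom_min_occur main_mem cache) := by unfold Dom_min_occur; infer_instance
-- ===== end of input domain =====

-- B replaces A's quadratic per-element scans with one frequency-dict pass plus lookups (faster).


-- ===== PORT A =====
-- Lean port of A: outer loop over range(len(cache)), inner scan counting matches, lis.insert(i, c).
def min_occur (main_mem : List Int) (cache : List Int) : List Int :=
  (PySem.List.pyRange 0 cache.length 1).foldl
    (fun lis i =>
      let c : Int := main_mem.foldl
        (fun c j => if PySem.List.pyGetD cache i 0 == j then c + 1 else c) 0
      PySem.List.insert lis i c)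
    []

-- ===== PORT B =====
-- Lean port of B: build the frequency dict in one pass, then look each cache element up.
def min_occur_alt (main_mem : List Int) (cache : List Int) : List Int :=
  let cnt : PySem.Dict Int Int :=
    main_mem.foldl (fun d j => d.insert j (d.getD j 0 + 1)) PySem.Dict.empty
  cache.map (fun x => cnt.getD x 0)

-- ===== PRECONDITION & SPEC =====
def Spec_min_occur (main_mem : List Int) (cache : List Int) (out : List Int) : Prop := out = min_occur_alt main_mem cache
instance (main_mem : List Int) (cache : List Int) (out : List Int) : Decidable (Spec_min_occur main_mem cache out) := by unfold Spec_min_occur; infer_instance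

-- ===== CLAIM (what is proved, stated in full; the proofs are below) =====
def Claim_equal_min_occur : Prop := ∀ (main_mem : List Int) (cache : List Int), Dom_min_occur main_mem cache → Spec_min_occur main_mem cache (min_occur main_mem cache)

-- ===== LEMMAS AND PROOFS =====

lemma insert_at_length (xs : List Int) (v : Int) :
    PySem.List.insert xs (xs.length : Int) v = xs ++ [v] := by
  simp [PySem.List.insert, PySem.List.sliceIndices]
  split_ifs with h
  · omega
  · simp

-- the outer loop of A appends (insert at the current length) one value per index
lemma foldl_insert_eq_map (g : Int → Int) (n : Nat) (l : List Int) :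
    (PySem.List.pyRange (l.length : Int) ((l.length : Int) + n) 1).foldl
      (fun lis i => PySem.List.insert lis i (g i)) l
    = l ++ (PySem.List.pyRange (l.length : Int) ((l.length : Int) + n) 1).map g := by
  induction n with
  | zero => simp [PySem.List.pyRange_one_eq_nil]
  | succ m ih =>
    have hsplit : PySem.List.pyRange (l.length : Int) ((l.length : Int) + (m + 1)) 1
        = PySem.List.pyRange (l.length : Int) ((l.length : Int) + m) 1 ++ [(l.length : Int) + m] := by
      have : ((l.length : Int) + (m + 1)) = ((l.length : Int) + m) + 1 := by ring
      rw [this, PySem.List.pyRange_one_succ_right (by omega)]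
    push_cast
    push_cast at ih hsplit
    rw [hsplit, List.foldl_append, List.map_append, ih]
    simp only [List.foldl_cons, List.foldl_nil, List.map_cons, List.map_nil]
    rw [← List.append_assoc]
    set L := l ++ (PySem.List.pyRange (l.length : Int) ((l.length : Int) + (m : Int)) 1).map g with hLdef
    have hL : ((L.length : Int)) = (l.length : Int) + (m : Int) := by
      rw [hLdef]
      simp only [List.length_append, List.length_map, PySem.List.length_pyRange_one]
      push_cast
      omega
    rw [← hL, insert_at_length]

lemma foldl_insert_zero (g : Int → Int) (n : Nat) :
    (PySem.List.pyRange 0 (n : Int) 1).foldl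
      (fun lis i => PySem.List.insert lis i (g i)) ([] : List Int)
    = (PySem.List.pyRange 0 (n : Int) 1).map g := by
  have h := foldl_insert_eq_map g n []
  simp only [List.length_nil, Nat.cast_zero, zero_add, List.nil_append] at h
  exact h

lemma count_comm (v : Int) (l : List Int) :
    l.foldl (fun c j => if v == j then c + 1 else c) (0 : Int) = (l.count v : Int) := by
  rw [PySem.List.foldl_if_add_one]
  have h : l.countP (fun j => v == j) = l.count v := by
    apply List.countP_congr
    intro x _
    rcases Decidable.em (v = x) with hx | hx
    · subst hx; rfl
    · rw [beq_eq_false_iff_ne.mpr hx, beq_eq_false_iff_ne.mpr (Ne.symm hx)]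
  rw [h]
  ring

lemma min_occur_eq_map (main_mem cache : List Int) :
    min_occur main_mem cache = cache.map (fun x => (main_mem.count x : Int)) := by
  unfold min_occur
  rw [foldl_insert_zero
    (fun i => main_mem.foldl (fun c j => if PySem.List.pyGetD cache i 0 == j then c + 1 else c) 0)
    cache.length]
  calc (PySem.List.pyRange 0 (cache.length : Int) 1).map
        (fun i => main_mem.foldl (fun c j => if PySem.List.pyGetD cache i 0 == j then c + 1 else c) 0)
      = (PySem.List.pyRange 0 (cache.length : Int) 1).map
        (fun i => (main_mem.count (PySem.List.pyGetD cache i 0) : Int)) := by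
        apply List.map_congr_left; intro i _; rw [count_comm]
    _ = ((PySem.List.pyRange 0 (cache.length : Int) 1).map
          (fun i => PySem.List.pyGetD cache i 0)).map (fun x => (main_mem.count x : Int)) := by
        rw [List.map_map]; rfl
    _ = cache.map (fun x => (main_mem.count x : Int)) := by
        rw [PySem.List.map_pyGetD_pyRange_zero']

lemma min_occur_alt_eq_map (main_mem cache : List Int) :
    min_occur_alt main_mem cache = cache.map (fun x => (main_mem.count x : Int)) := by
  simp [min_occur_alt, PySem.Dict.getD_foldl_insert_add_one]

-- ===== VERDICT =====
theorem min_occur_spec : Claim_equal_min_occur := by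
  intro main_mem cache _
  unfold Spec_min_occur
  rw [min_occur_eq_map, min_occur_alt_eq_map]
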